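-- pv_equiv track=rewrite | github.com/miliar/Code_Jam_Webscraper | solutions_python/solutions_year16_round2_nr1/1400.py | containsDigit
-- ===== SOURCE A (Python) =====
-- def containsDigit(s, digitword):
--     while len(s) > 0:
--         f = s.find(digitword[0])
--         if f == -1:
--             return '', False
--         else:
--             s = s[0:f]+s[f+1:]
--             digitword = digitword[1:]
--             if len(digitword) == 0:
--                 return s, True
-- ===== SOURCE B (Python) =====
-- def containsDigit(s, digitword):
--     need = {}
--     for c in digitword:
--         need[c] = need.get(c, 0) + 1
--     out = []
--     for ch in s:
--         if need.get(ch, 0) > 0: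
--             need[ch] -= 1
--         else:
--             out.append(ch)
--     if len(out) + len(digitword) == len(s):
--         return ''.join(out), True
--     return '', False
-- ===== Notes on version B (the rewrite author's own statement) =====
-- stated objective: faster
-- what changed: Replaces A's repeated find-and-splice loop (one scan of s per digitword character) by counting: build a counter of digitword once, skip required occurrences in a single pass over s, and decide success by comparing lengths; Pre_ excludes the inputs where A raises IndexError (empty digitword with nonempty s) or falls off its while-loop returning a bare None instead of a (str, bool) pair (empty s, or digitword longer than s with its first len(s) characters a permutation of s).
-- outside the precondition, e.g. on containsDigit('', ''): A returns None, B returns ('', True); on containsDigit('a', 'aa'): A returns None, B returns ('', False); on containsDigit('a', ''): A raises IndexError, B returns ('a', True)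
import Mathlib
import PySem

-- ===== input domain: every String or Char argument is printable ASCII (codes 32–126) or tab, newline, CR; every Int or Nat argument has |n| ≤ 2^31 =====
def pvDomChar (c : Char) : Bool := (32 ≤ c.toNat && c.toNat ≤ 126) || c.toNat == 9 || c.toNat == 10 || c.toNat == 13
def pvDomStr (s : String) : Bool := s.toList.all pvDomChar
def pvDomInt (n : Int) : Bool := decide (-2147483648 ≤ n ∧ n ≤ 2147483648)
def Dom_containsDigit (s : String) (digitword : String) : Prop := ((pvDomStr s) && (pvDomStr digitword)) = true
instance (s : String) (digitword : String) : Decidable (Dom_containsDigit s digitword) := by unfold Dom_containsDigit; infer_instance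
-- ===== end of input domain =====

-- B replaces A's quadratic repeated find-and-splice loop by counting: build a counter of
-- digitword once, skip required occurrences in a single pass over s, check by length (faster).


-- ===== PORT A =====
-- termination helper: a found single character points inside the string
theorem pv_find_singleton_cases (s : List Char) (c : Char) :
    PySem.Chars.find s [c] = -1 ∨
      ∃ k : Nat, PySem.Chars.find s [c] = (k : Int) ∧ k < s.length := by
  by_cases h : PySem.Chars.find s [c] = -1
  · exact Or.inl h
  · right
    have h0 : 0 ≤ PySem.Chars.find s [c] := by
      have := PySem.Chars.neg_one_le_find (s := s) (sub := [c])
      omega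
    refine ⟨(PySem.Chars.find s [c]).toNat, (Int.toNat_of_nonneg h0).symm, ?_⟩
    have hspec := PySem.Chars.find_spec (s := s) (sub := [c]) h0
    have hpre := hspec.1
    have hlen := hpre.length_le
    simp at hlen
    omega

-- the loop of A: while len(s) > 0 … (each pass removes one character of s)
def containsDigitGo (s : List Char) (dw : List Char) : Option (String × Bool) :=
  if hs : 0 < s.length then
    match PySem.List.pyGet? dw 0 with
    | none => none   -- digitword[0] raises IndexError here; excluded by Pre_
    | some c =>
      let f := PySem.Chars.find s [c]
      if hf : f = -1 then some ("", false)
      else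
        let s' := PySem.List.slice s (some 0) (some f) ++ PySem.List.slice s (some (f + 1)) none
        let dw' := PySem.List.slice dw (some 1) none
        if dw'.length = 0 then some (String.ofList s', true)
        else containsDigitGo s' dw'
  else none
termination_by s.length
decreasing_by
  rcases pv_find_singleton_cases s c with h | ⟨k, hk, hklt⟩
  · exact absurd h hf
  · simp only [s', f, hk]
    have h1 : ((k : Int)) + 1 = ((k + 1 : Nat) : Int) := by push_cast; ring
    rw [h1, PySem.List.slice_zero_start, PySem.List.slice_to_natCast,
      PySem.List.slice_from_natCast]
    simp
    omega

def containsDigit (s : String) (digitword : String) : Option (String × Bool) :=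
  containsDigitGo s.toList digitword.toList

-- ===== PORT B =====
-- need = {}; for c in digitword: need[c] = need.get(c, 0) + 1
def pvCountLoop (l : List Char) : PySem.Dict Char Int :=
  l.foldl (fun d ch => d.insert ch (d.getD ch 0 + 1)) PySem.Dict.empty

-- for ch in s: skip ch (decrementing its count) while needed, else append it to out
def pvBuildLoop : List Char → PySem.Dict Char Int → List Char
  | [], _ => []
  | ch :: t, need =>
    if need.getD ch 0 > 0 then pvBuildLoop t (need.insert ch (need.getD ch 0 - 1))
    else ch :: pvBuildLoop t need

def containsDigit_alt (s : String) (digitword : String) : Option (String × Bool) :=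
  let need := pvCountLoop digitword.toList
  let out := pvBuildLoop s.toList need
  if out.length + digitword.toList.length = s.toList.length then
    some (String.ofList out, true)
  else some ("", false)

-- ===== PRECONDITION & SPEC =====
-- Pre_ excludes exactly the inputs on which A does not return a (str, bool) pair: with
-- digitword = "" (and s nonempty) A raises IndexError on digitword[0]; with s = "", or when
-- digitword is longer than s and its first len(s) characters are a permutation of s, A's
-- while-loop exhausts s and falls through with a bare implicit None instead of a pair.
def Pre_containsDigit (s : String) (digitword : String) : Prop :=
  s.toList ≠ [] ∧ digitword.toList ≠ [] ∧
    ¬(s.toList.length < digitword.toList.length ∧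
      (digitword.toList.take s.toList.length).Perm s.toList)
instance (s : String) (digitword : String) : Decidable (Pre_containsDigit s digitword) := by
  unfold Pre_containsDigit; infer_instance

def pvWitness_containsDigit : String × String := ("ab", "b")

def Spec_containsDigit (s : String) (digitword : String) (out : Option (String × Bool)) : Prop :=
  out = containsDigit_alt s digitword
instance (s : String) (digitword : String) (out : Option (String × Bool)) :
    Decidable (Spec_containsDigit s digitword out) := by unfold Spec_containsDigit; infer_instance

-- ===== CLAIM (what is proved, stated in full; the proofs are below) =====
def Claim_equal_containsDigit : Prop :=
  ∀ (s : String) (digitword : String), Dom_containsDigit s digitword →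
    Pre_containsDigit s digitword →
    Spec_containsDigit s digitword (containsDigit s digitword)

-- ===== LEMMAS AND PROOFS =====

-- pure (function-valued) counters for the proofs
def pvCnt (l : List Char) : Char → Int := fun c => (l.count c : Int)
def pvDec (f : Char → Int) (c : Char) : Char → Int := fun x => if x = c then f x - 1 else f x
def pvInc (f : Char → Int) (c : Char) : Char → Int := fun x => if x = c then f x + 1 else f x

def pvSkipF : List Char → (Char → Int) → List Char
  | [], _ => []
  | ch :: t, f => if f ch > 0 then pvSkipF t (pvDec f ch) else ch :: pvSkipF t f

-- pure form of B: one skip pass, then the length test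
def pvPure2 (sl dwl : List Char) : Option (String × Bool) :=
  if (pvSkipF sl (pvCnt dwl)).length + dwl.length = sl.length then
    some (String.ofList (pvSkipF sl (pvCnt dwl)), true)
  else some ("", false)

theorem pvCountLoop_getD (l : List Char) (x : Char) :
    (pvCountLoop l).getD x 0 = (l.count x : Int) := by
  rw [pvCountLoop, PySem.Dict.getD_foldl_insert_add_one]
  simp

theorem pvBuildLoop_eq_skipF (l : List Char) (d : PySem.Dict Char Int) (f : Char → Int)
    (h : ∀ x, d.getD x 0 = f x) : pvBuildLoop l d = pvSkipF l f := by
  induction l generalizing d f with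
  | nil => rfl
  | cons ch t ih =>
    simp only [pvBuildLoop, pvSkipF, h ch]
    split_ifs with h1
    · refine ih _ _ (fun x => ?_)
      rw [PySem.Dict.getD_insert]
      by_cases hx : x = ch <;> simp [pvDec, hx, h x, h ch]
    · rw [ih _ _ h]

theorem pv_alt_eq_pure (s digitword : String) :
    containsDigit_alt s digitword = pvPure2 s.toList digitword.toList := by
  have hb : pvBuildLoop s.toList (pvCountLoop digitword.toList)
      = pvSkipF s.toList (pvCnt digitword.toList) :=
    pvBuildLoop_eq_skipF _ _ _ (fun x => pvCountLoop_getD _ x)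
  simp only [containsDigit_alt, pvPure2, hb]

-- [c] is a prefix of s.drop i exactly when s[i] is c
theorem pv_singleton_prefix_drop (s : List Char) (c : Char) (i : Nat) :
    [c] <+: s.drop i ↔ s[i]? = some c := by
  rw [← List.head?_drop]
  constructor
  · rintro ⟨t, ht⟩
    rw [← ht]; rfl
  · intro h
    cases hd : s.drop i with
    | nil => rw [hd] at h; simp at h
    | cons a t =>
      rw [hd] at h
      simp at h
      exact ⟨t, by simp [h]⟩

-- find of a single character is the first index of that character
theorem pv_find_singleton (s : List Char) (c : Char) :
    PySem.Chars.find s [c] =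
      (match PySem.List.index? s c with | none => -1 | some k => (k : Int)) := by
  by_cases hmem : c ∈ s
  · have h0 : 0 ≤ PySem.Chars.find s [c] :=
      (PySem.Chars.find_nonneg_iff s [c]).mpr ((List.singleton_infix_iff c s).mpr hmem)
    obtain ⟨hpre, hmin⟩ := PySem.Chars.find_spec h0
    have hget : s[(PySem.Chars.find s [c]).toNat]? = some c :=
      (pv_singleton_prefix_drop s c _).mp hpre
    have hFlt : (PySem.Chars.find s [c]).toNat < s.length := by
      rcases List.getElem?_eq_some_iff.mp hget with ⟨h, _⟩
      exact h
    have hidx : PySem.List.index? s c = some (PySem.Chars.find s [c]).toNat := by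
      rw [PySem.List.index?_eq_some_iff]
      refine ⟨s.take (PySem.Chars.find s [c]).toNat, s.drop ((PySem.Chars.find s [c]).toNat + 1),
        ?_, by simp [hFlt.le], ?_⟩
      · conv_lhs => rw [← List.take_append_drop (PySem.Chars.find s [c]).toNat s]
        congr 1
        rw [← List.getElem_cons_drop hFlt]
        congr 1
        rcases List.getElem?_eq_some_iff.mp hget with ⟨h, hv⟩
        exact hv
      · intro hmem'
        obtain ⟨j, hj, hjv⟩ := List.getElem_of_mem hmem'
        have hjF : j < (PySem.Chars.find s [c]).toNat := by
          have := hj; simp at this; omega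
        have hjs : s[j]? = some c := by
          rw [List.getElem_take] at hjv
          rw [List.getElem?_eq_getElem (by omega)]
          exact congrArg some hjv
        exact hmin j hjF ((pv_singleton_prefix_drop s c j).mpr hjs)
    rw [hidx]
    exact (Int.toNat_of_nonneg h0).symm
  · rw [(PySem.List.index?_eq_none_iff s c).mpr hmem]
    exact (PySem.Chars.find_eq_neg_one_iff s [c]).mpr
      (fun h => hmem ((List.singleton_infix_iff c s).mp h))

-- one unfolding of A's loop, in erase form
theorem pv_goA_cons (s : List Char) (c : Char) (cs : List Char) (hs : s ≠ []) :
    containsDigitGo s (c :: cs) =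
      if c ∈ s then
        (if cs = [] then some (String.ofList (s.erase c), true)
         else containsDigitGo (s.erase c) cs)
      else some ("", false) := by
  have hlen : 0 < s.length := List.length_pos_iff.mpr hs
  have hget0 : PySem.List.pyGet? (c :: cs) (0 : Int) = some c := by
    simp [PySem.List.pyGet?, PySem.List.pyIdx?]
  rw [containsDigitGo, dif_pos hlen]
  simp only [hget0]
  cases hidx : PySem.List.index? s c with
  | none =>
    have hmem : c ∉ s := (PySem.List.index?_eq_none_iff s c).mp hidx
    simp only [pv_find_singleton, hidx, if_neg hmem]
    simp
  | some k =>
    obtain ⟨pre, suf, hdecomp, hk, hpre⟩ := (PySem.List.index?_eq_some_iff s c k).mp hidx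
    have hmem : c ∈ s := by rw [hdecomp]; simp
    simp only [pv_find_singleton, hidx]
    rw [dif_neg (by omega : ¬ ((k : Int) = -1))]
    have hcast : ((k : Int)) + 1 = ((k + 1 : Nat) : Int) := by push_cast; ring
    rw [hcast, PySem.List.slice_zero_start, PySem.List.slice_to_natCast,
      PySem.List.slice_from_natCast, PySem.List.slice_from_one]
    have herase : s.take k ++ s.drop (k + 1) = s.erase c := by
      subst hk
      have h2 : pre ++ c :: suf = (pre ++ [c]) ++ suf := by simp
      have h3 : (pre ++ c :: suf).drop (pre.length + 1) = suf := by
        rw [h2, ← (by simp : (pre ++ [c]).length = pre.length + 1), List.drop_left]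
      rw [hdecomp, List.take_left, h3, List.erase_append_right _ hpre,
        List.erase_cons_head]
    rw [herase, if_pos hmem]
    simp only [List.tail_cons]
    by_cases hcs : cs = []
    · subst hcs; simp
    · rw [if_neg (by simpa using hcs), if_neg hcs]

theorem pvSkipF_zero (s : List Char) : pvSkipF s (fun _ => 0) = s := by
  induction s with
  | nil => rfl
  | cons ch t ih => simp [pvSkipF, ih]

-- the commutation lemma: skipping one extra c = erasing the first c beforehand
theorem pvSkipF_inc (s : List Char) (f : Char → Int) (c : Char)
    (hc : c ∈ s) (hf : 0 ≤ f c) : pvSkipF s (pvInc f c) = pvSkipF (s.erase c) f := by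
  induction s generalizing f with
  | nil => cases hc
  | cons h t ih =>
    by_cases hhc : h = c
    · subst hhc
      rw [List.erase_cons_head]
      have hpos : pvInc f h h > 0 := by simp [pvInc]; omega
      simp only [pvSkipF, if_pos hpos]
      have hdi : pvDec (pvInc f h) h = f := by
        funext x; by_cases hx : x = h <;> simp [pvDec, pvInc, hx]
      rw [hdi]
    · have hct : c ∈ t := by
        rcases List.mem_cons.mp hc with h1 | h1
        · exact absurd h1.symm hhc
        · exact h1
      have herase : (h :: t).erase c = h :: t.erase c := by
        simp [List.erase_cons, hhc]
      have hih : pvInc f c h = f h := by simp [pvInc, hhc]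
      rw [herase]
      by_cases hfh : f h > 0
      · simp only [pvSkipF, if_pos (show pvInc f c h > 0 by rw [hih]; exact hfh),
          if_pos hfh]
        have hcomm : pvDec (pvInc f c) h = pvInc (pvDec f h) c := by
          funext x
          have hch : ¬ c = h := fun hh => hhc hh.symm
          by_cases hxh : x = h <;> by_cases hxc : x = c
          · exact absurd (hxh.symm.trans hxc) hhc
          · simp [pvDec, pvInc, hxh, hxc, hhc, hch]
          · simp [pvDec, pvInc, hxh, hxc, hch]
          · simp [pvDec, pvInc, hxh, hxc]
        rw [hcomm]
        have hfc : pvDec f h c = f c := if_neg (fun hch => hhc hch.symm)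
        exact ih (pvDec f h) hct (hfc ▸ hf)
      · simp only [pvSkipF, if_neg (show ¬ (pvInc f c h > 0) by rw [hih]; exact hfh),
          if_neg hfh]
        rw [ih f hct hf]

-- skipping a character absent from s changes nothing
theorem pvSkipF_inc_not_mem (s : List Char) (f : Char → Int) (c : Char) (hc : c ∉ s) :
    pvSkipF s (pvInc f c) = pvSkipF s f := by
  induction s generalizing f with
  | nil => rfl
  | cons h t ih =>
    have hhc : h ≠ c := fun hh => hc (hh ▸ List.mem_cons_self)
    have hct : c ∉ t := fun ht => hc (List.mem_cons_of_mem _ ht)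
    have hih : pvInc f c h = f h := by simp [pvInc, hhc]
    simp only [pvSkipF, hih]
    by_cases hfh : f h > 0
    · have hcomm : pvDec (pvInc f c) h = pvInc (pvDec f h) c := by
        funext x
        have hch : ¬ c = h := fun hh => hhc hh.symm
        by_cases hxh : x = h <;> by_cases hxc : x = c
        · exact absurd (hxh.symm.trans hxc) hhc
        · simp [pvDec, pvInc, hxh, hxc, hhc, hch]
        · simp [pvDec, pvInc, hxh, hxc, hch]
        · simp [pvDec, pvInc, hxh, hxc]
      rw [if_pos hfh, if_pos hfh, hcomm, ih (pvDec f h) hct]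
    · rw [if_neg hfh, if_neg hfh, ih f hct]

theorem pvCnt_nil : pvCnt [] = fun _ => 0 := by
  funext x; simp [pvCnt]

theorem pvCnt_cons (c : Char) (cs : List Char) : pvCnt (c :: cs) = pvInc (pvCnt cs) c := by
  funext x
  by_cases hx : x = c
  · simp [pvCnt, pvInc, List.count_cons, hx]
  · simp [pvCnt, pvInc, List.count_cons, hx, Ne.symm hx]

-- at most |dw| characters of s are skipped
theorem pvSkip_len_ge (dwl : List Char) : ∀ sl : List Char,
    sl.length ≤ (pvSkipF sl (pvCnt dwl)).length + dwl.length := by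
  induction dwl with
  | nil =>
    intro sl
    rw [pvCnt_nil, pvSkipF_zero]
    simp
  | cons c cs ih =>
    intro sl
    rw [pvCnt_cons]
    by_cases hmem : c ∈ sl
    · rw [pvSkipF_inc sl _ c hmem (Int.natCast_nonneg _)]
      have h1 := ih (sl.erase c)
      have h2 := List.length_erase_of_mem hmem
      simp only [List.length_cons]
      omega
    · rw [pvSkipF_inc_not_mem sl _ c hmem]
      have h1 := ih sl
      simp only [List.length_cons]
      omega

-- main agreement: A's loop equals B's pure form under the precondition
theorem pv_main2 (dwl : List Char) : ∀ sl : List Char, sl ≠ [] → dwl ≠ [] →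
    ¬(sl.length < dwl.length ∧ (dwl.take sl.length).Perm sl) →
    containsDigitGo sl dwl = pvPure2 sl dwl := by
  induction dwl with
  | nil => intro sl _ hdw _; exact absurd rfl hdw
  | cons c cs ih =>
    intro sl hs _ hnp
    rw [pv_goA_cons sl c cs hs]
    have hslen : 0 < sl.length := List.length_pos_iff.mpr hs
    by_cases hmem : c ∈ sl
    · have herlen : (sl.erase c).length = sl.length - 1 := List.length_erase_of_mem hmem
      have hperm_sl : sl.Perm (c :: sl.erase c) := List.perm_cons_erase hmem
      by_cases hcs : cs = []
      · subst hcs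
        rw [if_pos hmem, if_pos rfl]
        have hskip : pvSkipF sl (pvCnt [c]) = sl.erase c := by
          rw [pvCnt_cons, pvCnt_nil, pvSkipF_inc sl _ c hmem le_rfl, pvSkipF_zero]
        rw [pvPure2, hskip, if_pos (by simp only [List.length_cons, List.length_nil]; omega)]
      · rw [if_pos hmem, if_neg hcs]
        have hskip : pvSkipF sl (pvCnt (c :: cs)) = pvSkipF (sl.erase c) (pvCnt cs) := by
          rw [pvCnt_cons, pvSkipF_inc sl _ c hmem (Int.natCast_nonneg _)]
        by_cases her : sl.erase c = []
        · -- then sl = [c] and the excluded perm case would hold: contradiction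
          exfalso
          apply hnp
          have h0 : (sl.erase c).length = 0 := by simp [her]
          have hlen1 : sl.length = 1 := by omega
          constructor
          · have : 0 < cs.length := List.length_pos_iff.mpr hcs
            simp only [List.length_cons]; omega
          · have hsl : sl = [c] := by
              have := hperm_sl
              rw [her] at this
              exact List.perm_singleton.mp this
            rw [hsl]
            simp
        · have hnp' : ¬((sl.erase c).length < cs.length ∧
              (cs.take (sl.erase c).length).Perm (sl.erase c)) := by
            rintro ⟨hl, hp⟩
            apply hnp
            constructor
            · simp only [List.length_cons]; omega
            · have htake : (c :: cs).take sl.length = c :: cs.take (sl.length - 1) := by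
                have : sl.length = (sl.length - 1) + 1 := by omega
                rw [this]
                rfl
              rw [htake]
              have : (c :: cs.take (sl.length - 1)).Perm (c :: sl.erase c) := by
                apply List.Perm.cons
                rw [← herlen]
                exact hp
              exact this.trans hperm_sl.symm
          rw [ih (sl.erase c) her hcs hnp']
          rw [pvPure2, pvPure2, hskip]
          simp only [List.length_cons]
          by_cases hcond : (pvSkipF (sl.erase c) (pvCnt cs)).length + cs.length
              = (sl.erase c).length
          · rw [if_pos hcond, if_pos (by omega)]
          · rw [if_neg hcond, if_neg (by omega)]
    · rw [if_neg hmem]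
      have hskip : pvSkipF sl (pvCnt (c :: cs)) = pvSkipF sl (pvCnt cs) := by
        rw [pvCnt_cons, pvSkipF_inc_not_mem sl _ c hmem]
      have hge := pvSkip_len_ge cs sl
      rw [pvPure2, hskip, if_neg (by simp only [List.length_cons]; omega)]

-- ===== VERDICT (by name: the statement is the Claim_ definition above) =====
theorem containsDigit_spec : Claim_equal_containsDigit := by
  intro s digitword _ hpre
  obtain ⟨hs, hdw, hnp⟩ := hpre
  unfold Spec_containsDigit
  rw [containsDigit, pv_alt_eq_pure, pv_main2 _ _ hs hdw hnp]
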